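-- pv_equiv track=rewrite | github.com/kisliakovsky/chains_evolution | src/collects.py | remove_item_from_matrix
-- ===== SOURCE A (Python) =====
-- from typing import TypeVar, List, Tuple, Dict
--
-- T = TypeVar('T')
--
-- TList = List[T]
--
-- def remove_item_from_list(item_to_remove: T, items: TList) -> Tuple[int, TList]:
--     new_items = []
--     removed_items_count = 0
--     for item in items:
--         if item_to_remove == item:
--             removed_items_count += 1
--         else:
--             new_items.append(item)
--     return removed_items_count, new_items
--
-- def remove_item_from_matrix(item_to_remove: T, matrix: List[List[T]]) -> Tuple[int, List[List[T]]]: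
--     new_matrix = []
--     matrix_removed_count = 0
--     for items in matrix:
--         removed_items_count, new_items = remove_item_from_list(item_to_remove, items)
--         new_matrix.append(new_items)
--         matrix_removed_count += removed_items_count
--     return matrix_removed_count, new_matrix
-- ===== SOURCE B (Python) =====
-- def remove_item_from_matrix(item_to_remove, matrix):
--     total = 0
--     new_matrix = []
--     for row in matrix:
--         n = row.count(item_to_remove)
--         new_row = list(row)
--         for _ in range(n):
--             new_row.remove(item_to_remove)
--         total += n
--         new_matrix.append(new_row)
--     return total, new_matrix
-- ===== Notes on version B (the rewrite author's own statement) =====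
-- stated objective: alternative
-- what changed: Instead of one filtering pass with a running counter per row, B first counts the occurrences with list.count and then deletes them one by one with repeated list.remove (first-occurrence deletion).
import Mathlib
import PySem

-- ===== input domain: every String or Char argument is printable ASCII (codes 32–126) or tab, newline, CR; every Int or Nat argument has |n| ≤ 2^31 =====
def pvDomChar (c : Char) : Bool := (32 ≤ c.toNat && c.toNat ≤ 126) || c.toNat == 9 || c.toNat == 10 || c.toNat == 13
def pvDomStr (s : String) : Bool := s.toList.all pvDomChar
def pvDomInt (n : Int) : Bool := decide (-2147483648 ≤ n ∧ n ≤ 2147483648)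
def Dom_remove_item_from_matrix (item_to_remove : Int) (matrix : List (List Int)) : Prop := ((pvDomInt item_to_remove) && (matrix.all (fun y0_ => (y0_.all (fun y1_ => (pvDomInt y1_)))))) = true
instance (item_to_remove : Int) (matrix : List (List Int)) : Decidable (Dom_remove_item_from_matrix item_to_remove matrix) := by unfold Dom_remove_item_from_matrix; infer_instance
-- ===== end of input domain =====

-- B counts each row's occurrences with list.count and then deletes them one by one with
-- repeated list.remove (first-occurrence deletion), instead of A's filtering pass with a
-- running counter (objective: alternative).
-- ===== PORT A =====
def remove_item_from_list (item_to_remove : Int) (items : List Int) : Int × List Int :=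
  let st := items.foldl (fun (st : List Int × Int) item =>
    if item_to_remove == item then (st.1, st.2 + 1) else (st.1 ++ [item], st.2)) ([], 0)
  (st.2, st.1)

def remove_item_from_matrix (item_to_remove : Int) (matrix : List (List Int)) : Int × List (List Int) :=
  let st := matrix.foldl (fun (st : List (List Int) × Int) items =>
    let r := remove_item_from_list item_to_remove items
    (st.1 ++ [r.2], st.2 + r.1)) ([], 0)
  (st.2, st.1)

-- ===== PORT B =====
-- 'new_row.remove(item)' → PySem.List.remove?; it always succeeds here because it is run
-- exactly count-many times, so the '.getD r' default branch is unreachable.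
def bStep (item_to_remove : Int) (st : Int × List (List Int)) (row : List Int) : Int × List (List Int) :=
  let n := PySem.List.count row item_to_remove
  let new_row := (PySem.List.pyRange 0 (n : Int) 1).foldl
    (fun r _ => (PySem.List.remove? r item_to_remove).getD r) row
  (st.1 + (n : Int), st.2 ++ [new_row])

def remove_item_from_matrix_alt (item_to_remove : Int) (matrix : List (List Int)) : Int × List (List Int) :=
  matrix.foldl (bStep item_to_remove) (0, [])

-- ===== PRECONDITION & SPEC =====
def Spec_remove_item_from_matrix (item_to_remove : Int) (matrix : List (List Int)) (out : Int × List (List Int)) : Prop := out = remove_item_from_matrix_alt item_to_remove matrix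
instance (item_to_remove : Int) (matrix : List (List Int)) (out : Int × List (List Int)) : Decidable (Spec_remove_item_from_matrix item_to_remove matrix out) := by unfold Spec_remove_item_from_matrix; infer_instance

-- ===== CLAIM =====
def Claim_equal_remove_item_from_matrix : Prop := ∀ (item_to_remove : Int) (matrix : List (List Int)), Dom_remove_item_from_matrix item_to_remove matrix → Spec_remove_item_from_matrix item_to_remove matrix (remove_item_from_matrix item_to_remove matrix)

-- ===== LEMMAS AND PROOFS =====
-- A's per-row loop: result is (filtered row, number of matches).
lemma rowA_loop (t : Int) (row : List Int) : ∀ (ns : List Int) (c : Int),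
    row.foldl (fun (st : List Int × Int) item =>
      if t == item then (st.1, st.2 + 1) else (st.1 ++ [item], st.2)) (ns, c)
    = (ns ++ row.filter (fun x => !(t == x)), c + (row.count t : Int)) := by
  induction row with
  | nil => intro ns c; simp
  | cons x xs ih =>
    intro ns c
    rw [List.foldl_cons]
    by_cases h : t = x
    · subst h
      simp only [beq_self_eq_true, if_true, List.filter_cons, Bool.not_true]
      rw [ih]
      simp [Prod.ext_iff]
      omega
    · have hb : (t == x) = false := by simp [h]
      simp only [hb, Bool.false_eq_true, if_false, List.filter_cons, Bool.not_false]
      rw [ih]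
      simp [Ne.symm h]

-- one remove-first step, packaged
def remStep (t : Int) (r : List Int) : List Int := (PySem.List.remove? r t).getD r

lemma remStep_cons_ne (t x : Int) (xs : List Int) (h : x ≠ t) :
    remStep t (x :: xs) = x :: remStep t xs := by
  unfold remStep
  rw [PySem.List.remove?_cons_of_ne xs h]
  cases hxs : PySem.List.remove? xs t <;> simp

lemma iterate_remStep_cons_ne (t x : Int) (h : x ≠ t) : ∀ (k : Nat) (xs : List Int),
    (remStep t)^[k] (x :: xs) = x :: (remStep t)^[k] xs := by
  intro k
  induction k with
  | zero => intro xs; simp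
  | succ k ih =>
    intro xs
    rw [Function.iterate_succ_apply, Function.iterate_succ_apply,
        remStep_cons_ne t x xs h, ih]

-- removing count-many first occurrences = filtering the element out
lemma iterate_remStep_count (t : Int) (row : List Int) :
    (remStep t)^[row.count t] row = row.filter (fun x => !(t == x)) := by
  induction row with
  | nil => simp
  | cons x xs ih =>
    by_cases h : x = t
    · subst h
      rw [List.count_cons_self, Function.iterate_succ_apply]
      have : remStep x (x :: xs) = xs := by simp [remStep]
      rw [this, ih]
      simp
    · rw [List.count_cons_of_ne h, iterate_remStep_cons_ne t x h, ih]
      have hb : (t == x) = false := by simp [Ne.symm h]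
      simp [hb]

-- B's inner range-loop is an iterate of remStep
lemma foldl_const_iterate (t : Int) : ∀ (l : List Int) (r : List Int),
    l.foldl (fun r _ => remStep t r) r = (remStep t)^[l.length] r := by
  intro l
  induction l with
  | nil => intro r; simp
  | cons a l ih =>
    intro r
    rw [List.foldl_cons, ih, List.length_cons, Function.iterate_succ_apply]

-- B's per-row computation equals the filtered row
lemma rowB (t : Int) (row : List Int) :
    (PySem.List.pyRange 0 ((PySem.List.count row t : Nat) : Int) 1).foldl
      (fun r _ => (PySem.List.remove? r t).getD r) row
    = row.filter (fun x => !(t == x)) := by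
  have hlen : (PySem.List.pyRange 0 ((PySem.List.count row t : Nat) : Int) 1).length
      = row.count t := by
    rw [PySem.List.length_pyRange_one]
    simp [PySem.List.count_eq]
  calc (PySem.List.pyRange 0 ((PySem.List.count row t : Nat) : Int) 1).foldl
        (fun r _ => remStep t r) row
      = (remStep t)^[row.count t] row := by rw [foldl_const_iterate, hlen]
    _ = row.filter (fun x => !(t == x)) := iterate_remStep_count t row

-- A's outer loop, with generalized accumulator
lemma matA_loop (t : Int) (m : List (List Int)) : ∀ (nm : List (List Int)) (c : Int),
    m.foldl (fun (st : List (List Int) × Int) items =>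
      let r := remove_item_from_list t items
      (st.1 ++ [r.2], st.2 + r.1)) (nm, c)
    = (nm ++ m.map (fun row => row.filter (fun x => !(t == x))),
       c + (m.map (fun row => (row.count t : Int))).sum) := by
  induction m with
  | nil => intro nm c; simp
  | cons r rs ih =>
    intro nm c
    have hr : remove_item_from_list t r
        = ((r.count t : Int), r.filter (fun x => !(t == x))) := by
      unfold remove_item_from_list
      rw [rowA_loop]
      simp
    rw [List.foldl_cons]
    simp only [hr]
    rw [ih]
    simp [Prod.ext_iff]
    ring

-- B's outer loop, with generalized accumulator
lemma matB_loop (t : Int) (m : List (List Int)) : ∀ (c : Int) (nm : List (List Int)),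
    m.foldl (bStep t) (c, nm)
    = (c + (m.map (fun row => (row.count t : Int))).sum,
       nm ++ m.map (fun row => row.filter (fun x => !(t == x)))) := by
  induction m with
  | nil => intro c nm; simp
  | cons r rs ih =>
    intro c nm
    have hstep : bStep t (c, nm) r
        = (c + (r.count t : Int), nm ++ [r.filter (fun x => !(t == x))]) := by
      simp only [bStep]
      rw [rowB]
      simp [PySem.List.count_eq]
    rw [List.foldl_cons, hstep, ih]
    simp [Prod.ext_iff]
    ring

-- ===== VERDICT =====
theorem remove_item_from_matrix_spec : Claim_equal_remove_item_from_matrix := by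
  intro t m _
  unfold Spec_remove_item_from_matrix remove_item_from_matrix remove_item_from_matrix_alt
  rw [matA_loop, matB_loop]
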